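-- pv_equiv track=rewrite | github.com/JunDamin/hwpapi | refactor_helper.py | remove_init_and_attributes
-- ===== SOURCE A (Python) =====
-- def remove_init_and_attributes(content):
--     """Remove __init__ methods and attributes_names definitions."""
--     lines = content.split('\n')
--     result_lines = []
--     skip_init = False
--     skip_attributes = False
--     brace_count = 0
--
--     for line in lines:
--         # Skip __init__ method
--         if 'def __init__(self, parameterset):' in line:
--             skip_init = True
--             continue
--         elif skip_init:
--             if line.strip().startswith('def ') or (line.strip() and not line.startswith('    ')):
--                 skip_init = False
--             else:
--                 continue
--
--         # Skip attributes_names assignment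
--         if 'self.attributes_names = [' in line:
--             skip_attributes = True
--             brace_count = line.count('[') - line.count(']')
--             continue
--         elif skip_attributes:
--             brace_count += line.count('[') - line.count(']')
--             if brace_count <= 0:
--                 skip_attributes = False
--             continue
--
--         if not skip_init and not skip_attributes:
--             result_lines.append(line)
--
--     return '\n'.join(result_lines)
-- ===== SOURCE B (Python) =====
-- def remove_init_and_attributes(content):
--     """Remove __init__ methods and attributes_names definitions.
--
--     Two staged passes: pass 1 drops __init__ blocks, pass 2 drops
--     attributes_names blocks from pass 1's survivors."""
--     lines = content.split('\n')
--     # pass 1: drop each __init__ header and body; the terminating line survives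
--     survivors = []
--     skipping = False
--     for line in lines:
--         if 'def __init__(self, parameterset):' in line:
--             skipping = True
--             continue
--         if skipping:
--             s = line.strip()
--             if s.startswith('def ') or (s and not line.startswith('    ')):
--                 skipping = False
--             else:
--                 continue
--         survivors.append(line)
--     # pass 2: drop attributes_names assignments by bracket balance
--     kept = []
--     balance = None
--     for line in survivors:
--         if 'self.attributes_names = [' in line:
--             balance = line.count('[') - line.count(']')
--         elif balance is not None:
--             balance += line.count('[') - line.count(']')
--             if balance <= 0:
--                 balance = None
--         else:
--             kept.append(line)
--     return '\n'.join(kept)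
-- ===== Notes on version B (the rewrite author's own statement) =====
-- stated objective: alternative
-- what changed: Replaces A's single fused state machine (skip_init/skip_attributes flags interacting in one loop) with two independent staged passes: pass 1 removes __init__ blocks producing an intermediate line list, pass 2 removes attributes_names blocks from those survivors.
import Mathlib
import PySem

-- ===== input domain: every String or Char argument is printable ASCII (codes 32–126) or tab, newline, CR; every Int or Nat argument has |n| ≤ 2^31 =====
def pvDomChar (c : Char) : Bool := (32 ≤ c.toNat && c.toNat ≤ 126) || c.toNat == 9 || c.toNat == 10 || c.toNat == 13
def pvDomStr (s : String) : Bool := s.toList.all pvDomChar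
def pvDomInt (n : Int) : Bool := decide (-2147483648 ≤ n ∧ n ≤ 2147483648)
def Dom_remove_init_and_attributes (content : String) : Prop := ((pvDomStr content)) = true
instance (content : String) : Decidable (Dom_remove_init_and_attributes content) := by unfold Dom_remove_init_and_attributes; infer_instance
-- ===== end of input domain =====

set_option maxRecDepth 8000


-- B replaces A's single fused state machine by two staged passes (init removal,
-- then bracket-balance attribute removal) — alternative decomposition, same cost.

-- shared literal patterns and per-line measures (identical expressions in both Pythons)
def pvInitPat : String := "def __init__(self, parameterset):"
def pvAttrPat : String := "self.attributes_names = ["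
def pvCnt (line : String) : Int :=
  (PySem.Str.count line "[" : Int) - (PySem.Str.count line "]" : Int)
-- line.strip().startswith('def ') or (line.strip() and not line.startswith('    '))
def pvTerm (line : String) : Bool :=
  PySem.Str.startswith (PySem.Str.strip line) "def "
    || (!(PySem.Str.strip line == "") && !PySem.Str.startswith line "    ")

-- ===== PORT A =====
-- the fall-through part of A's loop body (after the skip_init block; skip_init is False here)
def pvStepRestA (res : List String) (sa : Bool) (b : Int) (line : String) :
    List String × Bool × Bool × Int :=
  if PySem.Str.isIn pvAttrPat line then (res, false, true, pvCnt line)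
  else if sa then
    let b' := b + pvCnt line
    if b' ≤ 0 then (res, false, false, b') else (res, false, sa, b')
  else (res ++ [line], false, sa, b)

def pvStepA (st : List String × Bool × Bool × Int) (line : String) :
    List String × Bool × Bool × Int :=
  let (res, si, sa, b) := st
  if PySem.Str.isIn pvInitPat line then (res, true, sa, b)
  else if si then
    if pvTerm line then pvStepRestA res sa b line else (res, si, sa, b)
  else pvStepRestA res sa b line

def remove_init_and_attributes (content : String) : String :=
  let lines := (PySem.Str.split? content "\n").getD []
  let st := lines.foldl pvStepA ([], false, false, 0)
  PySem.Str.join "\n" st.1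

-- ===== PORT B =====
-- pass 1: drop __init__ headers and bodies, the terminating line survives
def pvStep1 (st : List String × Bool) (line : String) : List String × Bool :=
  if PySem.Str.isIn pvInitPat line then (st.1, true)
  else if st.2 then
    if pvTerm line then (st.1 ++ [line], false) else st
  else (st.1 ++ [line], st.2)

-- pass 2: drop attributes_names assignments by bracket balance
def pvStep2 (st : List String × Option Int) (line : String) : List String × Option Int :=
  if PySem.Str.isIn pvAttrPat line then (st.1, some (pvCnt line))
  else
    match st.2 with
    | some b =>
      let b' := b + pvCnt line
      (st.1, if b' ≤ 0 then none else some b')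
    | none => (st.1 ++ [line], none)

def remove_init_and_attributes_alt (content : String) : String :=
  let lines := (PySem.Str.split? content "\n").getD []
  let survivors := (lines.foldl pvStep1 ([], false)).1
  let kept := (survivors.foldl pvStep2 ([], none)).1
  PySem.Str.join "\n" kept

-- ===== PRECONDITION & SPEC =====
def Spec_remove_init_and_attributes (content : String) (out : String) : Prop := out = remove_init_and_attributes_alt content
instance (content : String) (out : String) : Decidable (Spec_remove_init_and_attributes content out) := by unfold Spec_remove_init_and_attributes; infer_instance

-- ===== CLAIM (what is proved, stated in full; the proofs are below) =====
def Claim_equal_remove_init_and_attributes : Prop := ∀ (content : String), Dom_remove_init_and_attributes content → Spec_remove_init_and_attributes content (remove_init_and_attributes content)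

-- ===== LEMMAS AND PROOFS =====

-- pass 1's accumulator factors out
theorem pvStep1_acc (xs : List String) : ∀ (acc : List String) (s : Bool),
    xs.foldl pvStep1 (acc, s)
      = (acc ++ (xs.foldl pvStep1 ([], s)).1, (xs.foldl pvStep1 ([], s)).2) := by
  induction xs with
  | nil => intro acc s; simp
  | cons l rest ih =>
    intro acc s
    simp only [List.foldl_cons]
    by_cases hinit : PySem.Chars.isIn pvInitPat.toList l.toList = true
    · have h1 : pvStep1 (acc, s) l = (acc, true) := by
        simp [pvStep1, PySem.Str.isIn, hinit]
      have h2 : pvStep1 ([], s) l = ([], true) := by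
        simp [pvStep1, PySem.Str.isIn, hinit]
      rw [h1, h2, ih acc true]
    · cases s with
      | true =>
        by_cases ht : pvTerm l = true
        · have h1 : pvStep1 (acc, true) l = (acc ++ [l], false) := by
            simp [pvStep1, PySem.Str.isIn, hinit, ht]
          have h2 : pvStep1 ([], true) l = ([l], false) := by
            simp [pvStep1, PySem.Str.isIn, hinit, ht]
          rw [h1, h2, ih (acc ++ [l]) false, ih [l] false]
          simp
        · have h1 : pvStep1 (acc, true) l = (acc, true) := by
            simp [pvStep1, PySem.Str.isIn, hinit, ht]
          have h2 : pvStep1 ([], true) l = ([], true) := by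
            simp [pvStep1, PySem.Str.isIn, hinit, ht]
          rw [h1, h2, ih acc true]
      | false =>
        have h1 : pvStep1 (acc, false) l = (acc ++ [l], false) := by
          simp [pvStep1, PySem.Str.isIn, hinit]
        have h2 : pvStep1 ([], false) l = ([l], false) := by
          simp [pvStep1, PySem.Str.isIn, hinit]
        rw [h1, h2, ih (acc ++ [l]) false, ih [l] false]
        simp

-- A's attribute machine state as pass 2's Option state
def pvAttrOf (sa : Bool) (b : Int) : Option Int := if sa then some b else none

-- one fall-through step of A equals one pass-2 step on the corresponding state
theorem pvRest_step2 (res : List String) (sa : Bool) (b : Int) (line : String) :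
    ((pvStepRestA res sa b line).1,
      pvAttrOf (pvStepRestA res sa b line).2.2.1 (pvStepRestA res sa b line).2.2.2)
      = pvStep2 (res, pvAttrOf sa b) line := by
  by_cases hattr : PySem.Chars.isIn pvAttrPat.toList line.toList = true
  · simp [pvStepRestA, pvStep2, PySem.Str.isIn, hattr, pvAttrOf]
  · cases sa with
    | true =>
      by_cases hb : b + pvCnt line ≤ 0 <;>
        simp [pvStepRestA, pvStep2, PySem.Str.isIn, hattr, pvAttrOf, hb]
    | false => simp [pvStepRestA, pvStep2, PySem.Str.isIn, hattr, pvAttrOf]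

-- fall-through steps of A never set skip_init
theorem pvRest_si (res : List String) (sa : Bool) (b : Int) (line : String) :
    (pvStepRestA res sa b line).2.1 = false := by
  by_cases hattr : PySem.Chars.isIn pvAttrPat.toList line.toList = true
  · simp [pvStepRestA, PySem.Str.isIn, hattr]
  · cases sa with
    | true =>
      by_cases hb : b + pvCnt line ≤ 0 <;> simp [pvStepRestA, PySem.Str.isIn, hattr, hb]
    | false => simp [pvStepRestA, PySem.Str.isIn, hattr]

-- fusion: A's fold equals pass 2 run over pass 1's output, from matching states
theorem pvFuse (lines : List String) : ∀ (res : List String) (si sa : Bool) (b : Int),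
    (lines.foldl pvStepA (res, si, sa, b)).1
      = ((lines.foldl pvStep1 ([], si)).1.foldl pvStep2 (res, pvAttrOf sa b)).1 := by
  induction lines with
  | nil => intro res si sa b; simp
  | cons l rest ih =>
    intro res si sa b
    simp only [List.foldl_cons]
    by_cases hinit : PySem.Chars.isIn pvInitPat.toList l.toList = true
    · -- l removed by both: A sets skip_init, pass 1 sets skipping
      have hA : pvStepA (res, si, sa, b) l = (res, true, sa, b) := by
        cases si <;> simp [pvStepA, PySem.Str.isIn, hinit]
      have h1 : pvStep1 ([], si) l = ([], true) := by
        simp [pvStep1, PySem.Str.isIn, hinit]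
      rw [hA, h1, ih res true sa b]
    · cases si with
      | true =>
        by_cases ht : pvTerm l = true
        · -- terminator: survives pass 1, processed by A's fall-through / pass 2
          have hA : pvStepA (res, true, sa, b) l = pvStepRestA res sa b l := by
            simp [pvStepA, PySem.Str.isIn, hinit, ht]
          have h1 : pvStep1 ([], true) l = ([l], false) := by
            simp [pvStep1, PySem.Str.isIn, hinit, ht]
          have hst : pvStepRestA res sa b l
              = ((pvStepRestA res sa b l).1, false,
                  (pvStepRestA res sa b l).2.2.1, (pvStepRestA res sa b l).2.2.2) := by
            rw [← pvRest_si res sa b l]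
          rw [hA, h1, pvStep1_acc rest [l] false, hst,
            ih (pvStepRestA res sa b l).1 false (pvStepRestA res sa b l).2.2.1
              (pvStepRestA res sa b l).2.2.2]
          simp only [List.cons_append, List.nil_append, List.foldl_cons]
          rw [← pvRest_step2 res sa b l]
        · -- init body line: dropped by both
          have hA : pvStepA (res, true, sa, b) l = (res, true, sa, b) := by
            simp [pvStepA, PySem.Str.isIn, hinit, ht]
          have h1 : pvStep1 ([], true) l = ([], true) := by
            simp [pvStep1, PySem.Str.isIn, hinit, ht]
          rw [hA, h1, ih res true sa b]
      | false =>
        have hA : pvStepA (res, false, sa, b) l = pvStepRestA res sa b l := by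
          simp [pvStepA, PySem.Str.isIn, hinit]
        have h1 : pvStep1 ([], false) l = ([l], false) := by
          simp [pvStep1, PySem.Str.isIn, hinit]
        have hst : pvStepRestA res sa b l
            = ((pvStepRestA res sa b l).1, false,
                (pvStepRestA res sa b l).2.2.1, (pvStepRestA res sa b l).2.2.2) := by
          rw [← pvRest_si res sa b l]
        rw [hA, h1, pvStep1_acc rest [l] false, hst,
          ih (pvStepRestA res sa b l).1 false (pvStepRestA res sa b l).2.2.1
            (pvStepRestA res sa b l).2.2.2]
        simp only [List.cons_append, List.nil_append, List.foldl_cons]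
        rw [← pvRest_step2 res sa b l]

-- ===== VERDICT (by name: the statement is the Claim_ definition above) =====
theorem remove_init_and_attributes_spec : Claim_equal_remove_init_and_attributes := by
  intro content _
  unfold Spec_remove_init_and_attributes
  show PySem.Str.join "\n"
      (((PySem.Str.split? content "\n").getD []).foldl pvStepA ([], false, false, 0)).1
    = remove_init_and_attributes_alt content
  rw [pvFuse]
  rfl
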